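-- pv_equiv track=rewrite | github.com/dobermanch/dev-quests | src/python/challenges/problems/largest_good_integer_test.py | Solution
-- ===== SOURCE A (Python) =====
-- def Solution(num: str) -> str:
--     result = ''
--     digit = num[0]
--     count = 1
--     for i in range(1, len(num)):
--         if num[i] != digit:
--             digit = num[i]
--             count = 1
--             continue
--
--         count += 1
--         if count >= 3 and digit > result:
--             result = digit
--
--     return str(result * 3)
-- ===== SOURCE B (Python) =====
-- def Solution(num: str) -> str:
--     for c in reversed(sorted(set(num))):
--         t = c * 3
--         if t in num:
--             return t
--     return ''
-- ===== Notes on version B (the rewrite author's own statement) =====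
-- stated objective: simpler
-- what changed: Replaces A's Python-level run-length state machine (digit/count/result updated per character) by a candidate scan: try each distinct character of num in descending order and return the first c whose triple c*3 occurs as a substring (C-level 'in'), so B drops the per-character interpreted loop.
import Mathlib
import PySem

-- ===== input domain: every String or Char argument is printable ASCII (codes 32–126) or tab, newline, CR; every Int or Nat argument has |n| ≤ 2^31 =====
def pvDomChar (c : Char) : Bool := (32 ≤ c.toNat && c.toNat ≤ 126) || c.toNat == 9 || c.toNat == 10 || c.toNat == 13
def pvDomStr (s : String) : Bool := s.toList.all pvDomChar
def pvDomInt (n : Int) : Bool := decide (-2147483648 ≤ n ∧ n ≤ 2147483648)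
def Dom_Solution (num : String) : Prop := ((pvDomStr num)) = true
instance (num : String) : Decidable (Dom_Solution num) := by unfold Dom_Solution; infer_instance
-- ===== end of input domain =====

-- B replaces A's run-length state machine by a descending scan over the distinct
-- characters of num, returning the first c whose triple c*3 is a substring (objective: simpler).

-- ===== PORT A =====
-- Python's `result` is always '' or a single-character string; it is represented as
-- Option Char (none = ''); `digit > result` is then exact: '' compares below every
-- one-character string, and one-character strings compare as their characters.
def pyGtRes (digit : Char) (res : Option Char) : Bool :=
  match res with
  | none => true
  | some r => decide (r < digit)

def solutionStep (st : Option Char × Char × Nat) (c : Char) : Option Char × Char × Nat :=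
  match st with
  | (res, digit, count) =>
    if c ≠ digit then
      (res, c, 1)
    else
      let count := count + 1
      if count ≥ 3 ∧ pyGtRes digit res then (some digit, digit, count)
      else (res, digit, count)

def Solution (num : String) : String :=
  match num.toList with
  | [] => ""   -- num[0] raises IndexError here; excluded by Pre_Solution
  | d :: rest =>
    match rest.foldl solutionStep (none, d, 1) with
    | (none, _, _) => ""                          -- str('' * 3) = ''
    | (some r, _, _) => String.ofList [r, r, r]   -- str(result * 3)

-- ===== PORT B =====
def Solution_alt (num : String) : String :=
  let cs := num.toList
  match (PySem.List.sorted (PySem.Set.ofList cs) (fun x => x) false).reverse.find?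
      (fun c => decide ([c, c, c] <:+: cs)) with     -- `c * 3 in num`
  | some c => String.ofList [c, c, c]
  | none => ""

-- ===== PRECONDITION & SPEC =====
-- Pre_ excludes only the empty string, on which A raises IndexError reading num[0].
def Pre_Solution (num : String) : Prop := num ≠ ""
instance (num : String) : Decidable (Pre_Solution num) := by unfold Pre_Solution; infer_instance
def pvWitness_Solution : String := "65333"

def Spec_Solution (num : String) (out : String) : Prop := out = Solution_alt num
instance (num : String) (out : String) : Decidable (Spec_Solution num out) := by unfold Spec_Solution; infer_instance

-- ===== CLAIM (what is proved, stated in full; the proofs are below) =====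
def Claim_equal_Solution : Prop := ∀ (num : String), Dom_Solution num → Pre_Solution num → Spec_Solution num (Solution num)

-- ===== LEMMAS AND PROOFS =====

theorem find_desc (p : Char → Bool) :
    ∀ (l : List Char), l.Pairwise (· > ·) →
    (l.find? p = none → ∀ e ∈ l, ¬ p e) ∧
    (∀ c, l.find? p = some c → p c ∧ ∀ e ∈ l, p e → e ≤ c) := by
  intro l hp
  induction l with
  | nil => simp
  | cons a t ih =>
    rcases List.pairwise_cons.1 hp with ⟨ha, hpt⟩
    rcases ih hpt with ⟨ih1, ih2⟩
    by_cases hpa : p a = true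
    · refine ⟨by simp [hpa], ?_⟩
      intro c hc
      rw [List.find?_cons_of_pos hpa, Option.some.injEq] at hc
      subst hc
      refine ⟨hpa, ?_⟩
      intro e he _
      rw [List.mem_cons] at he
      rcases he with rfl | he
      · exact le_refl _
      · exact le_of_lt (ha e he)
    · rw [List.find?_cons_of_neg (by simpa using hpa)]
      refine ⟨?_, ?_⟩
      · intro hn e he
        rw [List.mem_cons] at he
        rcases he with rfl | he
        · simpa using hpa
        · exact ih1 hn e he
      · intro c hc
        rcases ih2 c hc with ⟨h1, h2⟩
        refine ⟨h1, ?_⟩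
        intro e he hpe
        rw [List.mem_cons] at he
        rcases he with rfl | he
        · exact absurd hpe (by simpa using hpa)
        · exact h2 e he hpe

def Trip (l : List Char) (c : Char) : Prop := [c, c, c] <:+: l

theorem trip_not_short {l : List Char} {c : Char} (h : l.length < 3) : ¬ Trip l c := by
  intro hc
  have := hc.length_le
  simp at this
  omega


theorem trip_mem {l : List Char} {c : Char} (h : Trip l c) : c ∈ l := by
  rcases h with ⟨s, t, rfl⟩
  simp

theorem trip_cons {d : Char} {t : List Char} {c : Char} :
    Trip (d :: t) c ↔ ([c, c, c] <+: d :: t) ∨ Trip t c := List.infix_cons_iff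

theorem trip_extend {l : List Char} {x : List Char} {e : Char} (h : Trip l e) :
    Trip (x ++ l) e := by
  rcases h with ⟨s, t, hh⟩
  exact ⟨x ++ s, t, by rw [← hh]; simp⟩

theorem trip_skip1 {d c : Char} {l : List Char} (hne : c ≠ d) (e : Char) :
    Trip (d :: c :: l) e ↔ Trip (c :: l) e := by
  constructor
  · intro h
    rcases trip_cons.1 h with hp | h
    · rw [List.cons_prefix_cons, List.cons_prefix_cons] at hp
      exact absurd (hp.2.1.symm.trans hp.1) hne
    · exact h
  · exact fun h => trip_extend (x := [d]) h

theorem trip_skip2 {d c : Char} {l : List Char} (hne : c ≠ d) (e : Char) :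
    Trip (d :: d :: c :: l) e ↔ Trip (c :: l) e := by
  constructor
  · intro h
    rcases trip_cons.1 h with hp | h
    · rw [List.cons_prefix_cons, List.cons_prefix_cons, List.cons_prefix_cons] at hp
      exact absurd (hp.2.2.1.symm.trans hp.1) hne
    · exact (trip_skip1 hne e).1 h
  · exact fun h => trip_extend (x := [d, d]) h

theorem trip_ddd {d : Char} {l : List Char} (e : Char) :
    Trip (d :: d :: d :: l) e ↔ e = d ∨ Trip (d :: d :: l) e := by
  constructor
  · intro h
    rcases trip_cons.1 h with hp | h
    · exact Or.inl (List.cons_prefix_cons.1 hp).1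
    · exact Or.inr h
  · intro h
    rcases h with rfl | h
    · exact ⟨[], l, rfl⟩
    · exact trip_extend (x := [d]) h

def Cand (res : Option Char) (d : Char) (k : Nat) (l : List Char) (c : Char) : Prop :=
  res = some c ∨ Trip (List.replicate (min k 2) d ++ l) c

def Good (C : Char → Prop) (o : Option Char) : Prop :=
  (o = none → ∀ e, ¬ C e) ∧ (∀ c, o = some c → C c ∧ ∀ e, C e → e ≤ c)

theorem good_congr {C C' : Char → Prop} {o : Option Char} (h : ∀ e, C e ↔ C' e)
    (hg : Good C o) : Good C' o := by
  refine ⟨fun hn e he => hg.1 hn e ((h e).2 he), fun c hc => ?_⟩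
  rcases hg.2 c hc with ⟨h1, h2⟩
  exact ⟨(h c).1 h1, fun e he => h2 e ((h e).2 he)⟩

theorem foldA_char (l : List Char) :
    ∀ (res : Option Char) (d : Char) (k : Nat), 1 ≤ k →
    Good (Cand res d k l) (l.foldl solutionStep (res, d, k)).1 := by
  induction l with
  | nil =>
    intro res d k hk
    simp only [List.foldl_nil]
    constructor
    · rintro rfl e he
      rcases he with he | he
      · exact absurd he (by simp)
      · exact trip_not_short (by rw [List.append_nil, List.length_replicate]; omega) he
    · rintro c hc
      cases res with
      | none => exact absurd hc (by simp)
      | some r =>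
        rw [Option.some.injEq] at hc
        subst hc
        refine ⟨Or.inl rfl, ?_⟩
        intro e he
        rcases he with he | he
        · rw [Option.some.injEq] at he
          exact le_of_eq he.symm
        · exact absurd he (trip_not_short (by rw [List.append_nil, List.length_replicate]; omega))
  | cons c l' ih =>
    intro res d k hk
    rw [List.foldl_cons]
    by_cases hcd : c = d
    · subst hcd
      have hstep : solutionStep (res, c, k) c =
          (if k + 1 ≥ 3 ∧ pyGtRes c res then (some c, c, k + 1) else (res, c, k + 1)) := by
        simp [solutionStep]
      rw [hstep]
      by_cases hk1 : k = 1
      · subst hk1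
        rw [if_neg (by omega)]
        refine good_congr (fun e => ?_) (ih res c 2 (by omega))
        unfold Cand
        simp [List.replicate]
      · have hk2 : 2 ≤ k := by omega
        have hmin : min k 2 = 2 := by omega
        have hmin' : min (k + 1) 2 = 2 := by omega
        have holdl : List.replicate (min k 2) c ++ c :: l' = c :: c :: c :: l' := by
          rw [hmin]; simp [List.replicate]
        have hnewl : List.replicate (min (k + 1) 2) c ++ l' = c :: c :: l' := by
          rw [hmin']; simp [List.replicate]
        by_cases hgt : pyGtRes c res = true
        · rw [if_pos ⟨by omega, hgt⟩]
          have hg := ih (some c) c (k + 1) (by omega)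
          have hres : res = none ∨ ∃ r, res = some r ∧ r < c := by
            cases res with
            | none => exact Or.inl rfl
            | some r => exact Or.inr ⟨r, rfl, by simpa [pyGtRes] using hgt⟩
          constructor
          · intro hn
            exact absurd (Or.inl rfl : Cand (some c) c (k + 1) l' c) (hg.1 hn c)
          · intro c0 hc0
            rcases hg.2 c0 hc0 with ⟨h1, h2⟩
            have hdc0 : c ≤ c0 := h2 c (Or.inl rfl)
            constructor
            · unfold Cand at h1 ⊢
              rw [holdl]
              rcases h1 with h1 | h1
              · rw [Option.some.injEq] at h1
                subst h1
                exact Or.inr ((trip_ddd c).2 (Or.inl rfl))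
              · rw [hnewl] at h1
                exact Or.inr ((trip_ddd c0).2 (Or.inr h1))
            · intro e he
              unfold Cand at he
              rw [holdl] at he
              rcases he with he | he
              · rcases hres with h | ⟨r, hr, hrd⟩
                · rw [h] at he; exact absurd he (by simp)
                · rw [hr, Option.some.injEq] at he
                  subst he
                  exact le_trans (le_of_lt hrd) hdc0
              · rcases (trip_ddd e).1 he with rfl | he
                · exact hdc0
                · exact h2 e (Or.inr (by rw [hnewl]; exact he))
        · rw [if_neg (by intro hh; exact hgt hh.2)]
          have hg := ih res c (k + 1) (by omega)
          obtain ⟨r, hr, hdr⟩ : ∃ r, res = some r ∧ c ≤ r := by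
            cases res with
            | none => exact absurd (rfl : pyGtRes c none = true) hgt
            | some r =>
              refine ⟨r, rfl, ?_⟩
              exact not_lt.mp (by simpa [pyGtRes] using hgt)
          constructor
          · intro hn
            exact absurd (Or.inl hr : Cand res c (k + 1) l' r) (hg.1 hn r)
          · intro c0 hc0
            rcases hg.2 c0 hc0 with ⟨h1, h2⟩
            have hrc0 : r ≤ c0 := h2 r (Or.inl hr)
            constructor
            · unfold Cand at h1 ⊢
              rw [holdl]
              rcases h1 with h1 | h1
              · exact Or.inl h1
              · rw [hnewl] at h1
                exact Or.inr ((trip_ddd c0).2 (Or.inr h1))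
            · intro e he
              unfold Cand at he
              rw [holdl] at he
              rcases he with he | he
              · exact h2 e (Or.inl he)
              · rcases (trip_ddd e).1 he with rfl | he
                · exact le_trans hdr hrc0
                · exact h2 e (Or.inr (by rw [hnewl]; exact he))
    · have hstep : solutionStep (res, d, k) c = (res, c, 1) := by
        simp [solutionStep, hcd]
      rw [hstep]
      refine good_congr (fun e => ?_) (ih res c 1 (le_refl 1))
      unfold Cand
      have hm : min k 2 = 1 ∨ min k 2 = 2 := by omega
      have hrep1 : (List.replicate (min (1:ℕ) 2) c ++ l') = c :: l' := by simp
      rw [hrep1]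
      rcases hm with hm | hm
      · rw [hm]
        simp only [List.replicate, List.singleton_append]
        rw [trip_skip1 hcd]
      · rw [hm]
        simp only [List.replicate, List.cons_append, List.nil_append]
        rw [trip_skip2 hcd]

theorem A_char (d : Char) (rest : List Char) :
    Good (Trip (d :: rest)) ((rest.foldl solutionStep (none, d, 1)).1) := by
  refine good_congr (fun e => ?_) (foldA_char rest none d 1 (le_refl 1))
  unfold Cand
  simp

theorem B_char (cs : List Char) :
    Good (Trip cs)
      ((PySem.List.sorted (PySem.Set.ofList cs) (fun x => x) false).reverse.find?
        (fun c => decide ([c, c, c] <:+: cs))) := by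
  have hpw : ((PySem.List.sorted (PySem.Set.ofList cs) (fun x => x) false).reverse).Pairwise (· > ·) :=
    List.pairwise_reverse.2 (PySem.List.sorted_ofList_pairwise_lt cs)
  have hmem : ∀ e : Char, Trip cs e →
      e ∈ (PySem.List.sorted (PySem.Set.ofList cs) (fun x => x) false).reverse := by
    intro e he
    rw [List.mem_reverse, PySem.List.mem_sorted, PySem.Set.mem_ofList]
    exact trip_mem he
  rcases find_desc (fun c => decide ([c, c, c] <:+: cs)) _ hpw with ⟨h1, h2⟩
  constructor
  · intro hn e he
    exact (h1 hn e (hmem e he)) (by simpa [Trip] using he)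
  · intro c hc
    rcases h2 c hc with ⟨hp, hb⟩
    refine ⟨by simpa [Trip] using hp, ?_⟩
    intro e he
    exact hb e (hmem e he) (by simpa [Trip] using he)

-- ===== VERDICT (by name: the statement is the Claim_ definition above) =====
theorem Solution_spec : Claim_equal_Solution := by
  intro num _ hpre
  unfold Spec_Solution
  cases hcs : num.toList with
  | nil => exact absurd (String.toList_eq_nil_iff.mp hcs) hpre
  | cons d rest =>
    have hA := A_char d rest
    have hB := B_char num.toList
    rw [hcs] at hB
    unfold Solution Solution_alt
    rw [hcs]
    rcases hF : rest.foldl solutionStep (none, d, 1) with ⟨o, d2, k2⟩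
    rw [hF] at hA
    cases o with
    | none =>
      cases hb : (PySem.List.sorted (PySem.Set.ofList (d :: rest)) (fun x => x) false).reverse.find?
          (fun c => decide ([c, c, c] <:+: (d :: rest))) with
      | none => simp [hF, hb]
      | some b => exact absurd (hB.2 b hb).1 (hA.1 rfl b)
    | some a =>
      cases hb : (PySem.List.sorted (PySem.Set.ofList (d :: rest)) (fun x => x) false).reverse.find?
          (fun c => decide ([c, c, c] <:+: (d :: rest))) with
      | none => exact absurd (hA.2 a rfl).1 (hB.1 hb a)
      | some b =>
        have hab : a = b :=
          le_antisymm ((hB.2 b hb).2 a (hA.2 a rfl).1) ((hA.2 a rfl).2 b (hB.2 b hb).1)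
        simp [hF, hb, hab]
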